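-- pv_equiv track=rewrite | github.com/Hakanaou/deepLuna | luna/ruby_utils.py | remove_ruby_text
-- ===== SOURCE A (Python) =====
-- def remove_ruby_text(line):
--     # Ruby text consists of <bottom|top> text.
--     # This function strips formatting characters and top text to get only
--     # the baseline-level characters in a sentence.
--     ret = ""
--     processing_ruby = False
--     seen_midline = False
--
--     # Iterate each character in the line
--     for c in line:
--
--         # Is this the start of a ruby?
--         if c == '<':
--             # Sequential starts are likely an error in the input
--             assert not processing_ruby, \
--                 "Repeated ruby-start encountered in line '{line}'"
--
--             processing_ruby = True
--             seen_midline = False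
--             continue
--
--         # Is this a ruby midline?
--         if c == '|':
--             assert processing_ruby, \
--                 f"Found ruby-delimiter in non-ruby text for line '{line}'"
--             seen_midline = True
--             continue
--
--         # Is this a ruby end?
--         if c == '>':
--             assert processing_ruby, \
--                 f"Found ruby-end outside ruby context for line '{line}'"
--             assert seen_midline, \
--                 f"Found ruby-end without ruby-delimiter for line '{line}'"
--             processing_ruby = False
--             seen_midline = True
--             continue
--
--         # If this is a normal character, then append it to the output IFF
--         # - We are outside a ruby context _or_
--         # - We are indisde a ruby context but are before the midline
--         if not processing_ruby or not seen_midline: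
--             ret = ret + c
--
--     return ret
-- ===== SOURCE B (Python) =====
-- def remove_ruby_text(line):
--     # Slice-based rewrite: jump to the next marker with str.find instead of
--     # inspecting every character; one state variable instead of two booleans.
--     parts = []
--     state = 0  # 0 = OUTSIDE ruby, 1 = BOTTOM text (before '|'), 2 = TOP text (after '|')
--     i, n = 0, len(line)
--     while i < n:
--         j = n
--         for m in '<|>':
--             k = line.find(m, i)
--             if k != -1 and k < j:
--                 j = k
--         if state != 2:
--             parts.append(line[i:j])
--         if j == n:
--             break
--         c = line[j]
--         if c == '<':
--             assert state == 0, "Repeated ruby-start encountered in line '{line}'"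
--             state = 1
--         elif c == '|':
--             assert state != 0, f"Found ruby-delimiter in non-ruby text for line '{line}'"
--             state = 2
--         else:
--             assert state != 0, f"Found ruby-end outside ruby context for line '{line}'"
--             assert state == 2, f"Found ruby-end without ruby-delimiter for line '{line}'"
--             state = 0
--         i = j + 1
--     return ''.join(parts)
-- ===== Notes on version B (the rewrite author's own statement) =====
-- stated objective: faster
-- what changed: B replaces A's per-character loop with two booleans and repeated string concatenation by marker-to-marker slicing: it jumps to the next marker with str.find, appends whole slices to a list under a single 3-valued state, and joins once at the end.
import Mathlib
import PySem

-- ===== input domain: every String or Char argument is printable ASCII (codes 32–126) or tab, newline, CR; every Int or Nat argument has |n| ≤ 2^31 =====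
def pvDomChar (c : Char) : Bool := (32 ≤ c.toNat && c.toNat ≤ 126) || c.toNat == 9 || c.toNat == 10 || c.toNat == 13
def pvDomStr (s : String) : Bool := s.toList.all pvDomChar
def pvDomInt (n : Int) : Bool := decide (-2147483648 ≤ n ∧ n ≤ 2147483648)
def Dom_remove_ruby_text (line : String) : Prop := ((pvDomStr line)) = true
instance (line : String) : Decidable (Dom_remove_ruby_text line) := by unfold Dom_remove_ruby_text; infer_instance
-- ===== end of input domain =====

-- B replaces A's per-character state machine by marker-to-marker slicing
-- (find next of '<'/'|'/'>', append whole slice, one 3-valued state); same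
-- return value wherever A returns (both raise on malformed markup, excluded by Pre_).

-- ===== PORT A =====
-- Literal port of A's character loop; state = (processing_ruby, seen_midline),
-- accumulator = ret (as List Char); `none` marks A's AssertionError (outside Pre_).
def rubyGoA : List Char → Bool → Bool → List Char → Option (List Char)
  | [], _, _, ret => some ret
  | c :: rest, pr, sm, ret =>
    if c = '<' then
      if pr then none else rubyGoA rest true false ret
    else if c = '|' then
      if pr then rubyGoA rest pr true ret else none
    else if c = '>' then
      if pr && sm then rubyGoA rest false true ret else none
    else
      if !pr || !sm then rubyGoA rest pr sm (ret ++ [c]) else rubyGoA rest pr sm ret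

def remove_ruby_text (line : String) : String :=
  match rubyGoA line.toList false false [] with
  | some r => String.mk r
  | none => ""   -- unreachable under Pre_ (Python raises AssertionError)

-- ===== PORT B =====
def rubyMarker (c : Char) : Bool := c = '<' || c = '|' || c = '>'

-- Port of B's while loop: `takeWhile/dropWhile` to the next marker is exactly
-- B's `min` of the three `str.find` results plus the slice `line[i:j]`;
-- `parts` accumulates the slices, flattened at the end (''.join).
def rubyGoB (st : Nat) (cs : List Char) (parts : List (List Char)) : List Char :=
  let pre := cs.takeWhile (fun c => !rubyMarker c)
  let parts' := if st ≠ 2 then parts ++ [pre] else parts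
  match h : cs.dropWhile (fun c => !rubyMarker c) with
  | [] => parts'.flatten
  | m :: rest =>
    let st' := if m = '<' then 1 else if m = '|' then 2 else 0
    rubyGoB st' rest parts'
termination_by cs.length
decreasing_by
  have := List.length_dropWhile_le (fun c => !rubyMarker c) cs
  simp [h] at this; omega

def remove_ruby_text_alt (line : String) : String :=
  String.mk (rubyGoB 0 line.toList [])

-- ===== PRECONDITION & SPEC =====
-- Well-formed ruby markup, as a grammar on the SHAPE of the input: the
-- subsequence of marker characters '<' '|' '>' of the line must be a prefix of
-- a word of ('<' '|'+ '>')*.  On any other line A raises AssertionError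
-- (repeated '<', or '|'/'>' outside a ruby, or '>' before '|'); B raises the
-- same way there, so Pre_ excludes exactly the raising inputs.
mutual
  -- prefix of ('<' '|'+ '>')* : outside a ruby group
  def rubyGroups : List Char → Bool
    | [] => true
    | c :: ms => c = '<' && rubyInner ms
  -- just after '<': at least one '|' must follow
  def rubyInner : List Char → Bool
    | [] => true
    | c :: ms => c = '|' && rubyRest ms
  -- after '<' and at least one '|': more '|' or a closing '>'
  def rubyRest : List Char → Bool
    | [] => true
    | c :: ms => (c = '|' && rubyRest ms) || (c = '>' && rubyGroups ms)
end

def Pre_remove_ruby_text (line : String) : Prop :=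
  rubyGroups (line.toList.filter (fun c => c = '<' || c = '|' || c = '>')) = true
instance (line : String) : Decidable (Pre_remove_ruby_text line) := by
  unfold Pre_remove_ruby_text; infer_instance

def pvWitness_remove_ruby_text : String := "a<b|c>d"

def Spec_remove_ruby_text (line : String) (out : String) : Prop := out = remove_ruby_text_alt line
instance (line : String) (out : String) : Decidable (Spec_remove_ruby_text line out) := by unfold Spec_remove_ruby_text; infer_instance

-- ===== CLAIM (what is proved, stated in full; the proofs are below) =====
def Claim_equal_remove_ruby_text : Prop := ∀ (line : String), Dom_remove_ruby_text line → Pre_remove_ruby_text line → Spec_remove_ruby_text line (remove_ruby_text line)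

-- ===== LEMMAS AND PROOFS =====

-- A's assertion discipline as a two-boolean automaton (proof-side only).
def rubyValid : List Char → Bool → Bool → Bool
  | [], _, _ => true
  | c :: rest, pr, sm =>
    if c = '<' then !pr && rubyValid rest true false
    else if c = '|' then pr && rubyValid rest pr true
    else if c = '>' then pr && sm && rubyValid rest false true
    else rubyValid rest pr sm

-- The grammar on the marker subsequence coincides with the automaton.
theorem rubyValid_eq_grammar : ∀ (cs : List Char),
    (∀ sm, rubyValid cs false sm
        = rubyGroups (cs.filter (fun c => c = '<' || c = '|' || c = '>')))
    ∧ rubyValid cs true false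
        = rubyInner (cs.filter (fun c => c = '<' || c = '|' || c = '>'))
    ∧ rubyValid cs true true
        = rubyRest (cs.filter (fun c => c = '<' || c = '|' || c = '>')) := by
  intro cs
  induction cs with
  | nil => simp [rubyValid, rubyGroups, rubyInner, rubyRest]
  | cons c rest ih =>
    obtain ⟨ihG, ihI, ihR⟩ := ih
    by_cases h1 : c = '<'
    · subst h1
      simp [rubyValid, rubyGroups, rubyInner, rubyRest, List.filter_cons, ihI]
    · by_cases h2 : c = '|'
      · subst h2
        simp [rubyValid, rubyGroups, rubyInner, rubyRest, List.filter_cons, ihR]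
      · by_cases h3 : c = '>'
        · subst h3
          simp [rubyValid, rubyGroups, rubyInner, rubyRest, List.filter_cons, ihG]
        · simp [rubyValid, rubyGroups, rubyInner, rubyRest, List.filter_cons,
            h1, h2, h3, ihG, ihI, ihR]

-- A-state (pr, sm) encoded as B's single state.
def rubyEnc (pr sm : Bool) : Nat := if pr then (if sm then 2 else 1) else 0

-- One-step unfolding of rubyGoB with a plain (non-dependent) match.
theorem rubyGoB_unfold (st : Nat) (cs : List Char) (parts : List (List Char)) :
    rubyGoB st cs parts =
      (let pre := cs.takeWhile (fun c => !rubyMarker c)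
       let parts' := if st ≠ 2 then parts ++ [pre] else parts
       match cs.dropWhile (fun c => !rubyMarker c) with
       | [] => parts'.flatten
       | m :: rest => rubyGoB (if m = '<' then 1 else if m = '|' then 2 else 0) rest parts') := by
  rw [rubyGoB]
  cases h : List.dropWhile (fun c => !rubyMarker c) cs <;> simp

-- Accumulator lemma for B: the pending parts are a prefix of the result.
theorem rubyGoB_parts (n : Nat) : ∀ (cs : List Char), cs.length ≤ n →
    ∀ (st : Nat) (parts : List (List Char)),
    rubyGoB st cs parts = parts.flatten ++ rubyGoB st cs [] := by
  induction n with
  | zero =>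
    intro cs hcs st parts
    have : cs = [] := List.eq_nil_of_length_eq_zero (Nat.le_zero.mp hcs)
    subst this
    rw [rubyGoB_unfold, rubyGoB_unfold]
    split_ifs <;> simp
  | succ n ih =>
    intro cs hcs st parts
    rw [rubyGoB_unfold st cs parts, rubyGoB_unfold st cs []]
    simp only
    cases h : List.dropWhile (fun c => !rubyMarker c) cs with
    | nil => split_ifs <;> simp
    | cons m rest =>
      have hlen : rest.length ≤ n := by
        have := List.length_dropWhile_le (fun c => !rubyMarker c) cs
        rw [h] at this; simp at this; omega
      dsimp only
      rw [ih rest hlen _ (if st ≠ 2 then parts ++ [List.takeWhile (fun c => !rubyMarker c) cs] else parts),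
          ih rest hlen _ (if st ≠ 2 then ([] : List (List Char)) ++ [List.takeWhile (fun c => !rubyMarker c) cs] else [])]
      split_ifs <;> simp

theorem rubyGoB_cons_nonmarker (c : Char) (hc : rubyMarker c = false)
    (st : Nat) (cs : List Char) :
    rubyGoB st (c :: cs) [] = (if st ≠ 2 then [c] else []) ++ rubyGoB st cs [] := by
  rw [rubyGoB_unfold st (c :: cs), rubyGoB_unfold st cs]
  simp only [List.takeWhile_cons, List.dropWhile_cons, hc, Bool.not_false, if_true]
  cases h : List.dropWhile (fun c => !rubyMarker c) cs with
  | nil => split_ifs <;> simp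
  | cons m rest =>
    dsimp only
    rw [rubyGoB_parts rest.length rest le_rfl _ (if st ≠ 2 then ([] : List (List Char)) ++ [c :: List.takeWhile (fun c => !rubyMarker c) cs] else []),
        rubyGoB_parts rest.length rest le_rfl _ (if st ≠ 2 then ([] : List (List Char)) ++ [List.takeWhile (fun c => !rubyMarker c) cs] else [])]
    split_ifs <;> simp

theorem rubyGoB_cons_marker (c : Char) (hc : rubyMarker c = true)
    (st : Nat) (cs : List Char) :
    rubyGoB st (c :: cs) [] =
      rubyGoB (if c = '<' then 1 else if c = '|' then 2 else 0) cs [] := by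
  rw [rubyGoB_unfold]
  simp only [List.takeWhile_cons, List.dropWhile_cons, hc, Bool.not_true,
    Bool.false_eq_true, if_false]
  rw [rubyGoB_parts cs.length cs le_rfl]
  split_ifs <;> simp

-- Main invariant: on valid input, A's loop returns the accumulator followed by
-- B's result from the corresponding state.
theorem rubyGo_agree : ∀ (cs : List Char) (pr sm : Bool) (acc : List Char),
    rubyValid cs pr sm = true →
    rubyGoA cs pr sm acc = some (acc ++ rubyGoB (rubyEnc pr sm) cs []) := by
  intro cs
  induction cs with
  | nil =>
    intro pr sm acc _
    rw [rubyGoB_unfold]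
    simp only [rubyGoA, List.takeWhile_nil, List.dropWhile_nil]
    rcases pr with _|_ <;> rcases sm with _|_ <;> simp [rubyEnc]
  | cons c rest ih =>
    intro pr sm acc hv
    by_cases h1 : c = '<'
    · subst h1
      simp [rubyValid] at hv
      obtain ⟨hpr, hv'⟩ := hv
      subst hpr
      rw [rubyGoA]
      simp [ih _ _ acc hv', rubyGoB_cons_marker '<' (by decide), rubyEnc]
    · by_cases h2 : c = '|'
      · subst h2
        simp [rubyValid] at hv
        obtain ⟨hpr, hv'⟩ := hv
        subst hpr
        rw [rubyGoA]
        simp [ih _ _ acc hv', rubyGoB_cons_marker '|' (by decide), rubyEnc]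
      · by_cases h3 : c = '>'
        · subst h3
          simp [rubyValid] at hv
          obtain ⟨⟨hpr, hsm⟩, hv'⟩ := hv
          subst hpr; subst hsm
          rw [rubyGoA]
          simp [ih _ _ acc hv', rubyGoB_cons_marker '>' (by decide), rubyEnc]
        · simp only [rubyValid, if_neg h1, if_neg h2, if_neg h3] at hv
          rw [rubyGoA]
          rw [if_neg h1, if_neg h2, if_neg h3]
          have hm : rubyMarker c = false := by
            simp [rubyMarker, h1, h2, h3]
          rw [rubyGoB_cons_nonmarker _ hm]
          by_cases hps : (!pr || !sm) = true
          · rw [if_pos hps, ih _ _ _ hv]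
            have he : (if rubyEnc pr sm ≠ 2 then [c] else []) = [c] := by
              rcases pr with _|_ <;> rcases sm with _|_ <;> simp_all [rubyEnc]
            rw [he]; simp
          · rw [if_neg hps, ih _ _ _ hv]
            have he : (if rubyEnc pr sm ≠ 2 then [c] else []) = [] := by
              rcases pr with _|_ <;> rcases sm with _|_ <;> simp_all [rubyEnc]
            rw [he]; simp

-- ===== VERDICT (by name: the statement is the Claim_ definition above) =====
theorem remove_ruby_text_spec : Claim_equal_remove_ruby_text := by
  intro line _ hpre
  unfold Spec_remove_ruby_text remove_ruby_text remove_ruby_text_alt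
  have hv : rubyValid line.toList false false = true := by
    rw [(rubyValid_eq_grammar line.toList).1 false]
    exact hpre
  rw [rubyGo_agree _ _ _ _ hv]
  simp [rubyEnc]
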